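-- pv_equiv track=rewrite | github.com/rsarwas/aoc | 2021-12/answers.py | adjacent_nodes
-- ===== SOURCE A (Python) =====
-- def is_big(s):
--     return s[0] in "ABCDEFGHIJKLMNOPQRSTUVWXY"
--
-- def adjacent_nodes(path, edges):
--     # return a list of nodes, which are the other end of all edges
--     # that have the last node in path at an end
--     # skip the small nodes if they are already in the path
--     adjacent = []
--     node = path[-1]
--     for edge in edges:
--         end = None
--         if edge[0] == node:
--             end = edge[1]
--         if edge[1] == node:
--             end = edge[0]
--         if end is None:
--             continue
--         if is_big(end) or end not in path:
--             adjacent.append(end)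
--     return adjacent
-- ===== SOURCE B (Python) =====
-- def is_big(s):
--     return s[0] in "ABCDEFGHIJKLMNOPQRSTUVWXY"
--
-- def adjacent_nodes(path, edges):
--     # Build an adjacency index once, then filter the neighbors of the last node.
--     adj = {}
--     for edge in edges:
--         adj.setdefault(edge[0], []).append(edge[1])
--         if edge[0] != edge[1]:
--             adj.setdefault(edge[1], []).append(edge[0])
--     node = path[-1]
--     return [end for end in adj.get(node, []) if is_big(end) or end not in path]
-- ===== Notes on version B (the rewrite author's own statement) =====
-- stated objective: idiomatic
-- what changed: B builds an adjacency dict over the edges once and then filters the neighbor list of path[-1], instead of A's per-call scan that re-derives the other endpoint of each edge with mutable 'end' state.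
-- outside the precondition, e.g. on adjacent_nodes([], [('a', 'b')]): A raises IndexError, B raises IndexError; on adjacent_nodes(['a'], [('a', '')]): A raises IndexError, B raises IndexError
import Mathlib
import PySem

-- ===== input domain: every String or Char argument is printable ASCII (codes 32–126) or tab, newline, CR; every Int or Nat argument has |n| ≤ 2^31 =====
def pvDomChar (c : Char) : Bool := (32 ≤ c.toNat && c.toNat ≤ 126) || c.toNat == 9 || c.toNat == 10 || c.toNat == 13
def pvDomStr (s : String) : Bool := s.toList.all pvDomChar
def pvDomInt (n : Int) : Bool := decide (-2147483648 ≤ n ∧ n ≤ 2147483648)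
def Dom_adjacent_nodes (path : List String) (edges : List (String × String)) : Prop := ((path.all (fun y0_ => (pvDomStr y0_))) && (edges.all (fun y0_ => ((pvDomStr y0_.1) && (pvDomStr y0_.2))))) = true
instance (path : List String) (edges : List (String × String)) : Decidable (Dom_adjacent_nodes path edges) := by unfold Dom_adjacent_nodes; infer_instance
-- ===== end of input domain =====

-- B replaces A's per-edge endpoint scan with an adjacency dict built once, then a filter of the
-- neighbor list of path[-1] (objective: idiomatic; same asymptotic cost).

-- ===== PORT A =====
-- is_big(s): 's[0] in "A..Y"'. Exact for nonempty s (Pre_ guarantees every tested end is nonempty;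
-- on empty s Python raises IndexError, here we return false).
def isBig (s : String) : Bool :=
  match PySem.Str.pyGet? s 0 with
  | some c => ("ABCDEFGHIJKLMNOPQRSTUVWXY".toList).contains c
  | none => false

def adjacent_nodes (path : List String) (edges : List (String × String)) : List String :=
  match PySem.List.pyGet? path (-1) with
  | none => []   -- Python raises IndexError here; excluded by Pre_
  | some node =>
    edges.foldl (fun adjacent edge =>
      let e0 : Option String := none
      let e1 : Option String := if edge.1 == node then some edge.2 else e0
      let e2 : Option String := if edge.2 == node then some edge.1 else e1
      match e2 with
      | none => adjacent
      | some e => if isBig e || !(path.contains e) then adjacent ++ [e] else adjacent) []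

-- ===== PORT B =====
def adjacent_nodes_alt (path : List String) (edges : List (String × String)) : List String :=
  let adj : PySem.Dict String (List String) :=
    edges.foldl (fun adj edge =>
      let adj' := adj.modify edge.1 [] (fun l => l ++ [edge.2])
      if edge.1 != edge.2 then adj'.modify edge.2 [] (fun l => l ++ [edge.1]) else adj')
      PySem.Dict.empty
  match PySem.List.pyGet? path (-1) with
  | none => []   -- Python raises IndexError here; excluded by Pre_
  | some node =>
    (adj.getD node []).filter (fun e => isBig e || !(path.contains e))

-- ===== PRECONDITION & SPEC =====
-- Pre_ excludes exactly the inputs where Python A raises IndexError: an empty path (path[-1]),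
-- or an edge incident to the last node whose reported other end is the empty string (is_big("")).
def Pre_adjacent_nodes (path : List String) (edges : List (String × String)) : Prop :=
  path ≠ [] ∧ ∀ e ∈ edges, (e.1 = path.getLast! ∨ e.2 = path.getLast!) →
    (if e.2 = path.getLast! then e.1 else e.2) ≠ ""
instance (path : List String) (edges : List (String × String)) : Decidable (Pre_adjacent_nodes path edges) := by unfold Pre_adjacent_nodes; infer_instance
def pvWitness_adjacent_nodes : List String × (List (String × String)) :=
  (["start", "a"], [("start", "a"), ("a", "B"), ("B", "end"), ("a", "a")])

def Spec_adjacent_nodes (path : List String) (edges : List (String × String)) (out : List String) : Prop := out = adjacent_nodes_alt path edges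
instance (path : List String) (edges : List (String × String)) (out : List String) : Decidable (Spec_adjacent_nodes path edges out) := by unfold Spec_adjacent_nodes; infer_instance

-- ===== CLAIM (what is proved, stated in full; the proofs are below) =====
def Claim_equal_adjacent_nodes : Prop := ∀ (path : List String) (edges : List (String × String)), Dom_adjacent_nodes path edges → Pre_adjacent_nodes path edges → Spec_adjacent_nodes path edges (adjacent_nodes path edges)

-- ===== LEMMAS AND PROOFS =====

-- the "other end" A computes for one edge
def endOf (node : String) (e : String × String) : Option String :=
  if e.2 = node then some e.1 else if e.1 = node then some e.2 else none

theorem adjA_eq (node : String) (path : List String) (edges : List (String × String))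
    (acc : List String) :
    edges.foldl (fun adjacent edge =>
      let e0 : Option String := none
      let e1 : Option String := if edge.1 == node then some edge.2 else e0
      let e2 : Option String := if edge.2 == node then some edge.1 else e1
      match e2 with
      | none => adjacent
      | some e => if isBig e || !(path.contains e) then adjacent ++ [e] else adjacent) acc
    = acc ++ (edges.filterMap (endOf node)).filter (fun e => isBig e || !(path.contains e)) := by
  induction edges generalizing acc with
  | nil => simp
  | cons hd tl ih =>
    simp only [List.foldl_cons, List.filterMap_cons, ih, endOf]
    by_cases h2 : hd.2 = node <;> by_cases h1 : hd.1 = node <;>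
      simp [h1, h2] <;> split <;> simp_all

theorem adjB_eq (node : String) (edges : List (String × String))
    (d : PySem.Dict String (List String)) :
    (edges.foldl (fun adj edge =>
      let adj' := adj.modify edge.1 [] (fun l => l ++ [edge.2])
      if edge.1 != edge.2 then adj'.modify edge.2 [] (fun l => l ++ [edge.1]) else adj') d).getD node []
    = d.getD node [] ++ edges.filterMap (endOf node) := by
  induction edges generalizing d with
  | nil => simp
  | cons hd tl ih =>
    simp only [List.foldl_cons, List.filterMap_cons, ih, endOf]
    by_cases h2 : hd.2 = node
    · by_cases h1 : hd.1 = node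
      · simp [h1, h2]
      · simp [PySem.Dict.getD_modify, h1, h2, bne_iff_ne, Ne.symm h1]
    · by_cases h1 : hd.1 = node
      · simp [PySem.Dict.getD_modify, h1, h2, bne_iff_ne, Ne.symm h2]
      · by_cases hab : hd.1 = hd.2 <;>
          simp [PySem.Dict.getD_modify, hab, h1, h2, bne_iff_ne, Ne.symm h1, Ne.symm h2]

-- ===== VERDICT (by name: the statement is the Claim_ definition above) =====
theorem adjacent_nodes_spec : Claim_equal_adjacent_nodes := by
  intro path edges _ _
  unfold Spec_adjacent_nodes adjacent_nodes adjacent_nodes_alt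
  cases h : PySem.List.pyGet? path (-1) with
  | none => rfl
  | some node => simp only [adjA_eq, adjB_eq, PySem.Dict.getD_empty, List.nil_append]
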